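-- pv_equiv track=rewrite | github.com/maxensdestine/ECSE_316 | a1/DnsClient.py | get_qname
-- ===== SOURCE A (Python) =====
-- def get_qname(name: str):
--     response = []
--     for label in name.split('.'):
--         if len(label) > 63:
--             raise RuntimeError("The domain name contains a label"\
--                 "\n(" + label + ")\nthat is larger than 63 characters")
--
--         size = format(len(label), '08b')
--         response.append(size)
--         my_res = ''.join(format(ord(i), '08b') for i in label)
--         response.append(my_res)
--     response.append(format(0x0000, '08b'))
--     return ''.join(response)
-- ===== SOURCE B (Python) =====
-- def get_qname(name: str):
--     # Single scan over the characters (no split): detect label boundaries on the fly,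
--     # and render each wire byte by extracting its 8 bits with shift/mask arithmetic.
--     def to8(b):
--         return ''.join('1' if (b >> k) & 1 else '0' for k in range(7, -1, -1))
--
--     def emit(label):
--         if len(label) > 63:
--             raise RuntimeError("The domain name contains a label"\
--                 "\n(" + label + ")\nthat is larger than 63 characters")
--         return to8(len(label)) + ''.join(to8(ord(c)) for c in label)
--
--     out = []
--     label = ''
--     for c in name:
--         if c == '.':
--             out.append(emit(label))
--             label = ''
--         else:
--             label += c
--     out.append(emit(label))
--     out.append(to8(0))
--     return ''.join(out)
-- ===== Notes on version B (the rewrite author's own statement) =====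
-- stated objective: alternative
-- what changed: B never calls split: it scans the characters once, detecting dot boundaries itself with a running-label accumulator, and renders each wire byte by shift-and-mask bit extraction instead of A's string formatting to 8-bit binary.
import Mathlib
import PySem

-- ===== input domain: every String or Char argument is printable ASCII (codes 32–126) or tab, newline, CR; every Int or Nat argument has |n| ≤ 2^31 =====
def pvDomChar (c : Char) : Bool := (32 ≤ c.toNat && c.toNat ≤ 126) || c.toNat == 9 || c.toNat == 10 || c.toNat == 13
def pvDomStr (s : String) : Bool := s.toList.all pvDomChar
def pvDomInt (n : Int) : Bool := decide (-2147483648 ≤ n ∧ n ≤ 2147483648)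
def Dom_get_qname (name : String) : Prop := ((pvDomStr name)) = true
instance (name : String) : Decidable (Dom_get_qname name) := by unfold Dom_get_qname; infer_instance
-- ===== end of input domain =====

-- B scans the characters once (no split), detecting '.' boundaries itself, and renders
-- each wire byte by shift/mask bit extraction instead of format(...,'08b') (alternative, same cost).

-- ===== PORT A =====
-- format(n, '08b') for n ≥ 0: binary digits zero-padded to width 8
def fmt08b (n : Int) : List Char := PySem.Chars.zfill (PySem.Int.toBinChars n) 8

def get_qname (name : String) : String :=
  let labels := PySem.Chars.splitOn name.toList ['.']
  let response : List (List Char) :=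
    labels.foldl (fun acc label =>
      let size := fmt08b (label.length : Int)
      let my_res := PySem.Chars.join [] (label.map (fun c => fmt08b (c.toNat : Int)))
      (acc ++ [size]) ++ [my_res]) []
  String.ofList (PySem.Chars.join [] (response ++ [fmt08b 0]))

-- ===== PORT B =====
-- ''.join('1' if (b >> k) & 1 else '0' for k in range(7, -1, -1))
def to8 (b : Int) : List Char :=
  PySem.Chars.join []
    ((PySem.List.pyRange 7 (-1) (-1)).map
      (fun k => if PySem.Int.band (b >>> k.toNat) 1 ≠ 0 then ['1'] else ['0']))

-- emit(label): the wire encoding of one label (the Python raise for len > 63 is excluded by Pre_)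
def emitLabel (label : List Char) : List Char :=
  to8 (label.length : Int) ++ PySem.Chars.join [] (label.map (fun c => to8 (c.toNat : Int)))

def get_qname_alt (name : String) : String :=
  let st := name.toList.foldl
    (fun (st : List Char × List Char) c =>
      if c = '.' then (st.1 ++ emitLabel st.2, ([] : List Char)) else (st.1, st.2 ++ [c]))
    (([] : List Char), ([] : List Char))
  String.ofList (st.1 ++ emitLabel st.2 ++ to8 0)

-- ===== PRECONDITION & SPEC =====
-- Pre_ excludes exactly the inputs where A (and B) raise RuntimeError: a label longer than 63 characters.
def Pre_get_qname (name : String) : Prop :=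
  ∀ l ∈ PySem.Chars.splitOn name.toList ['.'], l.length ≤ 63
instance (name : String) : Decidable (Pre_get_qname name) := by unfold Pre_get_qname; infer_instance
def pvWitness_get_qname : String := "www.example.com"
def Spec_get_qname (name : String) (out : String) : Prop := out = get_qname_alt name
instance (name : String) (out : String) : Decidable (Spec_get_qname name out) := by unfold Spec_get_qname; infer_instance

-- ===== CLAIM (what is proved, stated in full; the proofs are below) =====
def Claim_equal_get_qname : Prop := ∀ (name : String), Dom_get_qname name → Pre_get_qname name → Spec_get_qname name (get_qname name)

-- ===== LEMMAS AND PROOFS =====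

theorem join_empty_eq_flatten (parts : List (List Char)) :
    PySem.Chars.join [] parts = parts.flatten := by
  induction parts with
  | nil => simp [PySem.Chars.join_nil]
  | cons p rest ih =>
    cases rest with
    | nil => simp [PySem.Chars.join_singleton]
    | cons q rest' => simp [PySem.Chars.join_cons_cons] at *; simp [ih]

-- PySem's splitOn on the single-char separator '.' is Mathlib's List.splitOnP (· == '.')
theorem splitOn_go_dot (fuel : Nat) (l cur : List Char) (acc : List (List Char)) (h : l.length ≤ fuel) :
    PySem.Chars.splitOn.go ['.'] fuel l cur acc
      = acc.reverse ++ (List.splitOnP (· == '.') l).modifyHead (cur.reverse ++ ·) := by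
  induction fuel generalizing l cur acc with
  | zero =>
    have hl : l = [] := List.eq_nil_of_length_eq_zero (by omega)
    subst hl
    simp [PySem.Chars.splitOn.go, List.splitOnP_nil]
  | succ fuel ih =>
    cases l with
    | nil => simp [PySem.Chars.splitOn.go, List.splitOnP_nil]
    | cons c rest =>
      by_cases hc : c = '.'
      · subst hc
        rw [show PySem.Chars.splitOn.go ['.'] (fuel+1) ('.'::rest) cur acc
            = PySem.Chars.splitOn.go ['.'] fuel (List.drop 1 ('.'::rest)) [] (cur.reverse :: acc) by
          simp [PySem.Chars.splitOn.go, List.isPrefixOf]]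
        rw [List.drop_one, List.tail_cons, ih rest [] (cur.reverse :: acc) (by simpa using h)]
        rw [List.splitOnP_cons]
        obtain ⟨hd, tl, hsp⟩ := List.exists_cons_of_ne_nil (List.splitOnP_ne_nil (· == '.') rest)
        simp [hsp]
      · rw [show PySem.Chars.splitOn.go ['.'] (fuel+1) (c::rest) cur acc
            = PySem.Chars.splitOn.go ['.'] fuel rest (c :: cur) acc by
          simp [PySem.Chars.splitOn.go, List.isPrefixOf, Ne.symm hc]]
        rw [ih rest (c :: cur) acc (by simpa using h)]
        rw [List.splitOnP_cons]
        obtain ⟨hd, tl, hsp⟩ := List.exists_cons_of_ne_nil (List.splitOnP_ne_nil (· == '.') rest)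
        simp [hsp, hc]

theorem splitOn_dot (cs : List Char) :
    PySem.Chars.splitOn cs ['.'] = List.splitOnP (· == '.') cs := by
  rw [PySem.Chars.splitOn, splitOn_go_dot cs.length.succ cs [] [] (by omega)]
  obtain ⟨hd, tl, hsp⟩ := List.exists_cons_of_ne_nil (List.splitOnP_ne_nil (· == '.') cs)
  simp [hsp]

-- the two byte renderings agree on 0..255 (label lengths ≤ 63 and Dom character codes)
set_option maxRecDepth 10000 in
theorem to8_eq_fmt08b (n : Nat) (h : n < 256) : to8 (n : Int) = fmt08b (n : Int) := by
  revert n h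
  unfold to8 fmt08b
  decide

-- every character of a splitOnP label is a character of the input
theorem mem_of_mem_splitOnP (cs : List Char) :
    ∀ l ∈ List.splitOnP (· == '.') cs, ∀ c ∈ l, c ∈ cs := by
  induction cs with
  | nil => simp [List.splitOnP_nil]
  | cons x rest ih =>
    intro l hl c hc
    rw [List.splitOnP_cons] at hl
    by_cases hx : x = '.'
    · simp [hx] at hl
      rcases hl with h | h
      · simp [h] at hc
      · exact List.mem_cons_of_mem _ (ih l h c hc)
    · simp [hx] at hl
      obtain ⟨hd, tl, hsp⟩ := List.exists_cons_of_ne_nil (List.splitOnP_ne_nil (· == '.') rest)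
      rw [hsp] at hl
      simp at hl
      rcases hl with h | h
      · subst h
        rcases List.mem_cons.mp hc with h | h
        · simp [h]
        · exact List.mem_cons_of_mem _ (ih hd (by simp [hsp]) c h)
      · exact List.mem_cons_of_mem _ (ih l (by simp [hsp, h]) c hc)

-- B's loop, characterised by splitOnP
theorem foldlB (cs : List Char) : ∀ (out label : List Char),
    ((cs.foldl
        (fun (st : List Char × List Char) c =>
          if c = '.' then (st.1 ++ emitLabel st.2, ([] : List Char)) else (st.1, st.2 ++ [c]))
        (out, label)).1
      ++ emitLabel (cs.foldl
        (fun (st : List Char × List Char) c =>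
          if c = '.' then (st.1 ++ emitLabel st.2, ([] : List Char)) else (st.1, st.2 ++ [c]))
        (out, label)).2 ++ to8 0)
    = out ++ (((List.splitOnP (· == '.') cs).modifyHead (label ++ ·)).map emitLabel).flatten
        ++ to8 0 := by
  induction cs with
  | nil => intro out label; simp [List.splitOnP_nil]
  | cons c rest ih =>
    intro out label
    by_cases hc : c = '.'
    · subst hc
      rw [List.foldl_cons, if_pos rfl, List.splitOnP_cons]
      obtain ⟨hd, tl, hsp⟩ := List.exists_cons_of_ne_nil (List.splitOnP_ne_nil (· == '.') rest)
      simpa [hsp] using ih (out ++ emitLabel label) []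
    · rw [List.foldl_cons, if_neg hc, List.splitOnP_cons]
      obtain ⟨hd, tl, hsp⟩ := List.exists_cons_of_ne_nil (List.splitOnP_ne_nil (· == '.') rest)
      simpa [hsp, hc] using ih out (label ++ [c])

-- A's per-label pieces, as a flatMap
theorem perLabelA (labels : List (List Char)) :
    labels.foldl (fun acc label =>
        (acc ++ [fmt08b (label.length : Int)])
          ++ [(label.map (fun c => fmt08b (c.toNat : Int))).flatten]) []
      = List.flatMap (fun l => [fmt08b (l.length : Int),
          (l.map (fun c => fmt08b (c.toNat : Int))).flatten]) labels := by
  have h : (fun (acc : List (List Char)) (label : List Char) =>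
        (acc ++ [fmt08b (label.length : Int)])
          ++ [(label.map (fun c => fmt08b (c.toNat : Int))).flatten])
      = fun acc label => acc ++ (fun l : List Char => [fmt08b (l.length : Int),
          (l.map (fun c => fmt08b (c.toNat : Int))).flatten]) label := by
    funext acc label; simp
  rw [h, PySem.List.foldl_append_eq_flatMap]
  simp

theorem flatten_flatMap_pair {α : Type} (f g : α → List Char) (L : List α) :
    (List.flatMap (fun l => [f l, g l]) L).flatten = L.flatMap (fun l => f l ++ g l) := by
  induction L with
  | nil => simp
  | cons a as ih => simp [List.flatMap_cons, ih]

theorem get_qname_spec : Claim_equal_get_qname := by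
  intro name hdom hpre
  unfold Spec_get_qname get_qname get_qname_alt
  simp only [join_empty_eq_flatten, perLabelA]
  congr 1
  unfold Pre_get_qname at hpre
  rw [splitOn_dot] at hpre
  rw [foldlB name.toList [] [], splitOn_dot]
  have hid : (fun x : List Char => [] ++ x) = id := by funext x; simp
  rw [hid, List.modifyHead_id]
  rw [List.flatten_append, flatten_flatMap_pair]
  have hchars : ∀ c ∈ name.toList, c.toNat < 256 := by
    intro c hc
    have := (List.all_eq_true.mp hdom) c hc
    simp [pvDomChar] at this
    omega
  have key : ∀ l ∈ List.splitOnP (· == '.') name.toList,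
      emitLabel l = fmt08b (l.length : Int)
        ++ (l.map (fun c => fmt08b (c.toNat : Int))).flatten := by
    intro l hl
    unfold emitLabel
    rw [join_empty_eq_flatten]
    congr 1
    · exact to8_eq_fmt08b l.length (by have := hpre l hl; omega)
    · congr 1
      apply List.map_congr_left
      intro c hc
      exact to8_eq_fmt08b c.toNat (hchars c (mem_of_mem_splitOnP name.toList l hl c hc))
  simp only [id_eq]
  rw [← List.flatMap_def, List.flatMap_congr key]
  simp
  simpa using (to8_eq_fmt08b 0 (by omega)).symm
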